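-- pv_equiv track=rewrite | github.com/kimjune01/june.kim | worklog/temporal-spanner2.py | binary_interleave_construction
-- ===== SOURCE A (Python) =====
-- def binary_interleave_construction(n):
--     """
--     Binary interleave: assign timestamps based on a binary tree structure.
--     Edge (i,j) gets timestamp based on the level at which i and j diverge
--     in a binary representation.
--
--     For edge (i,j), timestamp = encode(i,j) where the encoding creates
--     maximal temporal dependencies.
--     """
--     edges = {}
--     t = 1
--     # Assign timestamps level by level in a divide-and-conquer fashion
--     def assign(vertices, time_start):
--         if len(vertices) <= 1:
--             return time_start
--         mid = len(vertices) // 2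
--         left = vertices[:mid]
--         right = vertices[mid:]
--         t = time_start
--         # First: all cross edges left->right
--         for u in left:
--             for v in right:
--                 edge = (min(u,v), max(u,v))
--                 edges[edge] = t
--                 t += 1
--         # Then recurse
--         t = assign(left, t)
--         t = assign(right, t)
--         return t
--
--     assign(list(range(n)), 1)
--     return edges
-- ===== SOURCE B (Python) =====
-- def binary_interleave_construction(n):
--     """Pure two-stage version: first build the ordered list of cross edges by a
--     side-effect-free recursion (no dict, no threaded counter), then number them
--     1..m with enumerate in a dict comprehension."""
--     def edges_of(vs):
--         if len(vs) <= 1: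
--             return []
--         mid = len(vs) // 2
--         left, right = vs[:mid], vs[mid:]
--         cross = [(min(u, v), max(u, v)) for u in left for v in right]
--         return cross + edges_of(left) + edges_of(right)
--     return {e: i + 1 for i, e in enumerate(edges_of(list(range(n))))}
-- ===== Notes on version B (the rewrite author's own statement) =====
-- stated objective: alternative
-- what changed: A's single stateful recursion that threads a timestamp counter and mutates a dict is replaced by a pure recursion that returns the ordered list of cross edges, after which the dict is built in one enumerate pass assigning i+1 as the timestamp.
import Mathlib
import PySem

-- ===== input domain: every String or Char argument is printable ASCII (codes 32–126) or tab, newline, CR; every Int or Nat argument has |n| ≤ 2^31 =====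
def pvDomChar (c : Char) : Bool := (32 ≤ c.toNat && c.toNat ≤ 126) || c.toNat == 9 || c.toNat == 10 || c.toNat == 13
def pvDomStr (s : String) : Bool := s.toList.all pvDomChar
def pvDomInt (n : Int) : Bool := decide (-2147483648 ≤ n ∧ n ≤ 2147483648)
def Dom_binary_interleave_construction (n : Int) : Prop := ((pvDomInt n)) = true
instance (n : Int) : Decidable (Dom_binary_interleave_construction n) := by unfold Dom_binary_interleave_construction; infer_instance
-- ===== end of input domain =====

-- B replaces A's stateful recursion (threaded timestamp counter + mutated dict)
-- by a pure recursion returning the ordered edge list, numbered consecutively afterwards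
-- in one enumerate pass (alternative decomposition, same cost).
-- A's port carries a Nat fuel argument solely to make its recursion structural;
-- the entry point supplies enough fuel, so the fuel branch is never the result.

-- ===== PORT A =====
-- the two nested 'for u in left: for v in right:' loops over (edges, t)
def pvCrossA (left right : List Int)
    (st : PySem.Dict (Int × Int) Int × Int) : PySem.Dict (Int × Int) Int × Int :=
  left.foldl (fun st u =>
    right.foldl (fun st v => (st.1.insert (min u v, max u v) st.2, st.2 + 1)) st) st

-- the recursive helper 'assign' (the mutated closure variable 'edges' is threaded)
def pvAssignA : Nat → List Int → Int → PySem.Dict (Int × Int) Int →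
    PySem.Dict (Int × Int) Int × Int
  | 0, _, time_start, edges => (edges, time_start)
  | fuel + 1, vertices, time_start, edges =>
    if vertices.length ≤ 1 then (edges, time_start)
    else
      let mid := vertices.length / 2
      let left := vertices.take mid
      let right := vertices.drop mid
      let st1 := pvCrossA left right (edges, time_start)
      let st2 := pvAssignA fuel left st1.2 st1.1
      pvAssignA fuel right st2.2 st2.1

def binary_interleave_construction (n : Int) : List (Int × Int × Int) :=
  ((pvAssignA (PySem.List.pyRange 0 n 1).length (PySem.List.pyRange 0 n 1) 1
      PySem.Dict.empty).1).items.map (fun p => (p.1.1, p.1.2, p.2))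

-- ===== PORT B =====
-- 'edges_of(vs)': pure recursion returning the ordered list of cross edges;
-- the list comprehension over left × right is the flatMap/map below
def pvEdgesB (vs : List Int) : List (Int × Int) :=
  if vs.length ≤ 1 then []
  else
    let mid := vs.length / 2
    let left := vs.take mid
    let right := vs.drop mid
    let cross := left.flatMap (fun u => right.map (fun v => (min u v, max u v)))
    cross ++ pvEdgesB left ++ pvEdgesB right
termination_by vs.length
decreasing_by
  · simp only [List.length_take]; omega
  · simp only [List.length_drop]; omega

-- '{e: i + 1 for i, e in enumerate(edges_of(list(range(n))))}'
def binary_interleave_construction_alt (n : Int) : List (Int × Int × Int) :=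
  ((PySem.List.enumerate (pvEdgesB (PySem.List.pyRange 0 n 1)) 0).foldl
      (fun d p => d.insert p.2 (p.1 + 1)) PySem.Dict.empty).items.map
    (fun p => (p.1.1, p.1.2, p.2))

-- ===== PRECONDITION & SPEC =====
def Spec_binary_interleave_construction (n : Int) (out : List (Int × Int × Int)) : Prop := out = binary_interleave_construction_alt n
instance (n : Int) (out : List (Int × Int × Int)) : Decidable (Spec_binary_interleave_construction n out) := by unfold Spec_binary_interleave_construction; infer_instance

-- ===== CLAIM (what is proved, stated in full; the proofs are below) =====
def Claim_equal_binary_interleave_construction : Prop := ∀ (n : Int), Dom_binary_interleave_construction n → Spec_binary_interleave_construction n (binary_interleave_construction n)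

-- ===== LEMMAS AND PROOFS =====

-- the counter-threading step A performs per edge, used only in the proofs
def pvStep (st : PySem.Dict (Int × Int) Int × Int) (e : Int × Int) :
    PySem.Dict (Int × Int) Int × Int :=
  (st.1.insert e st.2, st.2 + 1)

-- fuel-free (well-founded) version of A's helper, used only in the proofs
def pvAssignW (vertices : List Int) (time_start : Int)
    (edges : PySem.Dict (Int × Int) Int) : PySem.Dict (Int × Int) Int × Int :=
  if vertices.length ≤ 1 then (edges, time_start)
  else
    let mid := vertices.length / 2
    let left := vertices.take mid
    let right := vertices.drop mid
    let st1 := pvCrossA left right (edges, time_start)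
    let st2 := pvAssignW left st1.2 st1.1
    pvAssignW right st2.2 st2.1
termination_by vertices.length
decreasing_by
  · simp only [List.length_take]; omega
  · simp only [List.length_drop]; omega

-- enough fuel: the fuel version of A's helper agrees with the fuel-free one
theorem pvAssignA_eq_W : ∀ (fuel : Nat) (vertices : List Int) (t : Int)
    (edges : PySem.Dict (Int × Int) Int), vertices.length ≤ fuel →
    pvAssignA fuel vertices t edges = pvAssignW vertices t edges
  | 0, vertices, t, edges, h => by
    have hv : vertices = [] := List.eq_nil_of_length_eq_zero (by omega)
    subst hv
    rw [pvAssignW]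
    simp [pvAssignA]
  | fuel + 1, vertices, t, edges, h => by
    rw [pvAssignA, pvAssignW]
    by_cases h1 : vertices.length ≤ 1
    · simp [h1]
    · simp only [h1, if_false]
      rw [pvAssignA_eq_W, pvAssignA_eq_W]
      · simp only [List.length_take]; omega
      · simp only [List.length_drop]; omega

-- A's nested cross loops = a fold of pvStep over B's cross-edge list
theorem pvCrossA_eq_foldl (left right : List Int)
    (st : PySem.Dict (Int × Int) Int × Int) :
    pvCrossA left right st =
      (left.flatMap (fun u => right.map (fun v => (min u v, max u v)))).foldl pvStep st := by
  unfold pvCrossA pvStep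
  rw [List.foldl_flatMap]
  congr 1
  funext st u
  rw [List.foldl_map]

-- A's recursive helper = a fold of pvStep over B's edge list
theorem pvAssignW_eq_foldl : ∀ (vs : List Int) (t : Int)
    (d : PySem.Dict (Int × Int) Int),
    pvAssignW vs t d = (pvEdgesB vs).foldl pvStep (d, t)
  | vs, t, d => by
    rw [pvAssignW, pvEdgesB]
    by_cases h : vs.length ≤ 1
    · simp [h]
    · simp only [h, if_false, List.foldl_append]
      rw [pvCrossA_eq_foldl, pvAssignW_eq_foldl, pvAssignW_eq_foldl]
termination_by vs => vs.length
decreasing_by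
  all_goals first
    | (simp only [List.length_take]; omega)
    | (simp only [List.length_drop]; omega)

-- folding pvStep from counter s+1 = B's enumerate fold from index s
theorem pvFold_eq_enum : ∀ (es : List (Int × Int)) (d : PySem.Dict (Int × Int) Int)
    (s : Int),
    (es.foldl pvStep (d, s + 1)).1 =
      (PySem.List.enumerate es s).foldl (fun d p => d.insert p.2 (p.1 + 1)) d := by
  intro es
  induction es with
  | nil => intro d s; rfl
  | cons e es ih =>
    intro d s
    rw [PySem.List.enumerate_cons]
    simp only [List.foldl_cons]
    have h2 : (s : Int) + 1 + 1 = (s + 1) + 1 := by ring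
    calc ((es.foldl pvStep (d.insert e (s + 1), s + 1 + 1)).1)
        = (es.foldl pvStep (d.insert e (s + 1), (s + 1) + 1)).1 := by rw [h2]
      _ = _ := ih _ _

-- ===== VERDICT (by name: the statement is the Claim_ definition above) =====
theorem binary_interleave_construction_spec : Claim_equal_binary_interleave_construction := by
  intro n _
  unfold Spec_binary_interleave_construction
  unfold binary_interleave_construction binary_interleave_construction_alt
  rw [pvAssignA_eq_W _ _ _ _ (le_refl _)]
  rw [pvAssignW_eq_foldl]
  have h := pvFold_eq_enum (pvEdgesB (PySem.List.pyRange 0 n 1)) PySem.Dict.empty 0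
  simp only [zero_add] at h
  rw [h]
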